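-- pv_equiv track=rewrite | github.com/michael-horansky/coherent-states | code snippets/commutator_simplification.py | contraction_specific_indices
-- ===== SOURCE A (Python) =====
-- def contraction_specific_indices(list_of_indices, number_of_contractions):
--     if number_of_contractions == 0:
--         return([[]]) # Returns one contraction, which has no contraction pairs (the empty contraction)
--     # The added contraction lower-higher, to avoid duplicates
--     res = []
--     for lower_paired_element in range(len(list_of_indices)-1-(number_of_contractions - 1)*2):
--         for higher_paired_element in range(lower_paired_element+1, len(list_of_indices)):
--             cur_prefix = [list_of_indices[lower_paired_element], list_of_indices[higher_paired_element]]
--             cur_reduced_indices = list_of_indices.copy()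
--             del cur_reduced_indices[higher_paired_element]
--             del cur_reduced_indices[0:lower_paired_element+1]
--             reduced_contractions = contraction_specific_indices(cur_reduced_indices, number_of_contractions - 1)
--             for i in range(len(reduced_contractions)):
--                 res.append([cur_prefix] + reduced_contractions[i])
--     return(res)
-- ===== SOURCE B (Python) =====
-- def contraction_specific_indices(list_of_indices, number_of_contractions):
--     # Take/skip recursion on the first element instead of A's quadratic index loops.
--     if number_of_contractions == 0:
--         return [[]]
--     if not list_of_indices or len(list_of_indices) < 2 * number_of_contractions:
--         return []
--     first = list_of_indices[0]
--     rest = list_of_indices[1:]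
--     res = []
--     # pair the first element with each later element, in increasing partner order
--     for j in range(len(rest)):
--         pair = [first, rest[j]]
--         for tail in contraction_specific_indices(rest[:j] + rest[j+1:], number_of_contractions - 1):
--             res.append([pair] + tail)
--     # skip the first element entirely
--     res.extend(contraction_specific_indices(rest, number_of_contractions))
--     return res
-- ===== Notes on version B (the rewrite author's own statement) =====
-- stated objective: alternative
-- what changed: Replaced A's double index loop (over lower/higher positions with slice-deletion of the prefix) by a take/skip recursion on the first element: pair it with each later element or drop it, with an explicit len<2k cutoff.
import Mathlib
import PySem

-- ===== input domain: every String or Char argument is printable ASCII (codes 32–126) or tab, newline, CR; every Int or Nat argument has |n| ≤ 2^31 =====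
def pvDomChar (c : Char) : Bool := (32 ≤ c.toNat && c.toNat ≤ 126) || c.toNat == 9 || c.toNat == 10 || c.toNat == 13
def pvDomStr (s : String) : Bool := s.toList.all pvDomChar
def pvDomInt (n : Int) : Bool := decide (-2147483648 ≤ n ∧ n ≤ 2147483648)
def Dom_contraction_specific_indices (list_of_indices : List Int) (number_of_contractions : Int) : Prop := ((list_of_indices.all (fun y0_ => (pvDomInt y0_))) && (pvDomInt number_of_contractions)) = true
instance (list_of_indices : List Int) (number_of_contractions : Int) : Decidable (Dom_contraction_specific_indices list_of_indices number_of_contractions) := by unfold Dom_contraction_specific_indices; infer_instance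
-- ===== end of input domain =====

-- B replaces A's double index loop by a take/skip recursion on the first element (objective: alternative decomposition, same output order).

-- ===== PORT A =====
-- Literal port of A: outer loop over lower, inner over higher; 'del cur[higher]; del cur[0:lower+1]'
-- is eraseIdx followed by drop (exact here: whenever the loop body runs, 0 ≤ lower and
-- lower+1 ≤ higher < len, the nonnegative in-range case of Python indexing/slice deletion);
-- the res-appending loops emit the same elements in the same order as flatMap/map.
-- '.attach' only carries the range membership needed for termination.
def contraction_specific_indices (list_of_indices : List Int) (number_of_contractions : Int) : List (List (List Int)) :=
  if number_of_contractions = 0 then [[]]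
  else
    (PySem.List.pyRange 0 ((list_of_indices.length : Int) - 1 - (number_of_contractions - 1) * 2) 1).attach.flatMap
      (fun lower =>
        (PySem.List.pyRange (lower.1 + 1) (list_of_indices.length : Int) 1).attach.flatMap
          (fun higher =>
            let cur_prefix : List Int :=
              [PySem.List.pyGetD list_of_indices lower.1 0, PySem.List.pyGetD list_of_indices higher.1 0]
            let cur_reduced_indices : List Int :=
              (list_of_indices.eraseIdx higher.1.toNat).drop (lower.1 + 1).toNat
            (contraction_specific_indices cur_reduced_indices (number_of_contractions - 1)).map
              (fun c => cur_prefix :: c)))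
termination_by list_of_indices.length
decreasing_by
  have hl := (PySem.List.mem_pyRange_one.mp lower.2)
  have hh := (PySem.List.mem_pyRange_one.mp higher.2)
  have h1 : higher.1.toNat < list_of_indices.length := by omega
  have h2 := List.length_eraseIdx_of_lt (l := list_of_indices) h1
  simp only [List.length_drop]
  omega

-- ===== PORT B =====
-- Literal port of Source B: base guards, then the pair-the-first-element branch (rest[:j]+rest[j+1:]
-- is take j ++ drop (j+1), exact since 0 ≤ j) followed by the skip-the-first-element branch.
def contraction_specific_indices_alt (list_of_indices : List Int) (number_of_contractions : Int) : List (List (List Int)) :=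
  if number_of_contractions = 0 then [[]]
  else if list_of_indices = [] ∨ (list_of_indices.length : Int) < 2 * number_of_contractions then []
  else
    let first : Int := list_of_indices.headD 0
    let rest : List Int := list_of_indices.tail
    ((PySem.List.pyRange 0 (rest.length : Int) 1).attach.flatMap
      (fun j =>
        let pair : List Int := [first, PySem.List.pyGetD rest j.1 0]
        (contraction_specific_indices_alt (rest.take j.1.toNat ++ rest.drop (j.1.toNat + 1)) (number_of_contractions - 1)).map
          (fun tail => pair :: tail)))
    ++ contraction_specific_indices_alt rest number_of_contractions
termination_by list_of_indices.length
decreasing_by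
  · have hj := (PySem.List.mem_pyRange_one.mp j.2)
    have hne : list_of_indices ≠ [] := by tauto
    have hpos : 0 < list_of_indices.length := List.length_pos_of_ne_nil hne
    have ht : list_of_indices.tail.length = list_of_indices.length - 1 := List.length_tail
    simp only [List.length_append, List.length_take, List.length_drop]
    omega
  · have hne : list_of_indices ≠ [] := by tauto
    have hpos : 0 < list_of_indices.length := List.length_pos_of_ne_nil hne
    have ht : list_of_indices.tail.length = list_of_indices.length - 1 := List.length_tail
    omega

-- ===== PRECONDITION & SPEC =====
def Spec_contraction_specific_indices (list_of_indices : List Int) (number_of_contractions : Int) (out : List (List (List Int))) : Prop := out = contraction_specific_indices_alt list_of_indices number_of_contractions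
instance (list_of_indices : List Int) (number_of_contractions : Int) (out : List (List (List Int))) : Decidable (Spec_contraction_specific_indices list_of_indices number_of_contractions out) := by unfold Spec_contraction_specific_indices; infer_instance

-- ===== CLAIM (what is proved, stated in full; the proofs are below) =====
def Claim_equal_contraction_specific_indices : Prop := ∀ (list_of_indices : List Int) (number_of_contractions : Int), Dom_contraction_specific_indices list_of_indices number_of_contractions → Spec_contraction_specific_indices list_of_indices number_of_contractions (contraction_specific_indices list_of_indices number_of_contractions)

-- ===== LEMMAS AND PROOFS =====

theorem pv_flatMap_attach {α β : Type} : ∀ (l : List α) (f : {x // x ∈ l} → List β)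
    (g : α → List β), (∀ x, f x = g x.1) → l.attach.flatMap f = l.flatMap g := by
  intro l
  induction l with
  | nil => intro f g h; rfl
  | cons a t ih =>
    intro f g h
    rw [List.attach_cons, List.flatMap_cons, List.flatMap_map, List.flatMap_cons, h]
    congr 1
    exact ih _ g (fun x => h _)

theorem pv_flatMap_congr_mem {α β : Type} {l : List α} {f g : α → List β}
    (h : ∀ x ∈ l, f x = g x) : l.flatMap f = l.flatMap g := by
  induction l with
  | nil => rfl
  | cons a t ih =>
    rw [List.flatMap_cons, List.flatMap_cons, h a (by simp),
        ih (fun x hx => h x (List.mem_cons_of_mem a hx))]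

theorem pv_flatMap_pyRange_shift {β : Type} (a b : Int) (f : Int → List β) :
    (PySem.List.pyRange (a + 1) (b + 1) 1).flatMap f
      = (PySem.List.pyRange a b 1).flatMap (fun x => f (x + 1)) := by
  rw [PySem.List.pyRange_one, PySem.List.pyRange_one, List.flatMap_map, List.flatMap_map]
  have hb : (b + 1 - (a + 1)) = b - a := by ring
  rw [hb]
  apply pv_flatMap_congr_mem
  intro x _
  show f (a + 1 + x) = f (a + x + 1)
  congr 1
  ring

-- A, unfolded and with the attach stripped (k ≠ 0 case)
theorem pv_A_unfold (lst : List Int) (k : Int) (hk : k ≠ 0) :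
    contraction_specific_indices lst k
      = (PySem.List.pyRange 0 ((lst.length : Int) - 1 - (k - 1) * 2) 1).flatMap
          (fun lower =>
            (PySem.List.pyRange (lower + 1) (lst.length : Int) 1).flatMap
              (fun higher =>
                (contraction_specific_indices ((lst.eraseIdx higher.toNat).drop (lower + 1).toNat) (k - 1)).map
                  (fun c => [PySem.List.pyGetD lst lower 0, PySem.List.pyGetD lst higher 0] :: c))) := by
  rw [contraction_specific_indices.eq_def, if_neg hk]
  exact pv_flatMap_attach _ _ _ (fun lower => pv_flatMap_attach _ _ _ (fun higher => rfl))

-- B, unfolded and with the attach stripped (main case)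
theorem pv_B_unfold (x : Int) (rest : List Int) (k : Int) (hk : k ≠ 0)
    (hlen : ¬ ((((x :: rest).length : Int)) < 2 * k)) :
    contraction_specific_indices_alt (x :: rest) k
      = ((PySem.List.pyRange 0 (rest.length : Int) 1).flatMap
          (fun j =>
            (contraction_specific_indices_alt (rest.take j.toNat ++ rest.drop (j.toNat + 1)) (k - 1)).map
              (fun tail => [x, PySem.List.pyGetD rest j 0] :: tail)))
        ++ contraction_specific_indices_alt rest k := by
  rw [contraction_specific_indices_alt.eq_def, if_neg hk, if_neg (by simp only [not_or]; exact ⟨by simp, hlen⟩)]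
  simp only [List.headD_cons, List.tail_cons]
  congr 1
  exact pv_flatMap_attach _ _ _ (fun j => rfl)

theorem pv_A_nil (k : Int) (hk : k ≠ 0) : contraction_specific_indices [] k = [] := by
  rw [pv_A_unfold [] k hk]
  apply List.flatMap_eq_nil_iff.mpr
  intro lower hlow
  obtain ⟨h0, _⟩ := PySem.List.mem_pyRange_one.mp hlow
  have hnil : (([] : List Int).length : Int) = 0 := rfl
  rw [PySem.List.pyRange_one_eq_nil (by omega)]
  rfl

theorem pv_getD_cons_succ (x : Int) (t : List Int) (i : Int) (hi : 0 ≤ i) :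
    PySem.List.pyGetD (x :: t) (i + 1) 0 = PySem.List.pyGetD t i 0 := by
  rw [show i = (i.toNat : Int) from (Int.toNat_of_nonneg hi).symm]
  rw [show ((i.toNat : Int) + 1) = ((i.toNat + 1 : Nat) : Int) by push_cast; ring]
  rw [PySem.List.pyGetD_natCast, PySem.List.pyGetD_natCast]
  simp [List.getD]

-- main equivalence, by strong induction on the list length
theorem pv_main : ∀ (n : Nat) (lst : List Int) (k : Int), lst.length = n →
    contraction_specific_indices lst k = contraction_specific_indices_alt lst k := by
  intro n
  induction n using Nat.strong_induction_on with
  | _ n ih =>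
    intro lst k hlen
    by_cases hk : k = 0
    · subst hk
      rw [contraction_specific_indices.eq_def, contraction_specific_indices_alt.eq_def]
      simp
    · match lst with
      | [] =>
        rw [pv_A_nil k hk, contraction_specific_indices_alt.eq_def, if_neg hk,
            if_pos (Or.inl rfl)]
      | x :: rest =>
        by_cases hshort : (((x :: rest).length : Int)) < 2 * k
        · -- A's outer range is empty; B's length guard fires
          rw [pv_A_unfold _ k hk, contraction_specific_indices_alt.eq_def, if_neg hk,
              if_pos (Or.inr hshort)]
          rw [PySem.List.pyRange_one_eq_nil (by simp at hshort ⊢; omega)]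
          rfl
        · -- main case
          have hL : ((x :: rest).length : Int) = (rest.length : Int) + 1 := by simp
          have hrl : rest.length < n := by simp at hlen; omega
          rw [pv_A_unfold _ k hk]
          have hM : (0 : Int) < ((x :: rest).length : Int) - 1 - (k - 1) * 2 := by
            simp at hshort ⊢; omega
          rw [PySem.List.pyRange_one_cons hM, List.flatMap_cons]
          rw [pv_B_unfold x rest k hk hshort]
          congr 1
          · -- lower = 0 block equals B's pair block
            rw [hL, pv_flatMap_pyRange_shift 0 (rest.length : Int)]
            apply pv_flatMap_congr_mem
            intro j hj
            dsimp only
            obtain ⟨hj0, hjlt⟩ := PySem.List.mem_pyRange_one.mp hj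
            have htn : (j + 1).toNat = j.toNat + 1 := by omega
            have hred : ((x :: rest).eraseIdx (j + 1).toNat).drop ((0 : Int) + 1).toNat
                = rest.eraseIdx j.toNat := by
              rw [htn]; simp [List.eraseIdx_cons_succ]
            rw [hred]
            rw [PySem.List.pyGetD_zero_cons]
            rw [pv_getD_cons_succ x rest j hj0]
            have hers : rest.take j.toNat ++ rest.drop (j.toNat + 1) = rest.eraseIdx j.toNat :=
              (List.eraseIdx_eq_take_drop_succ rest j.toNat).symm
            rw [hers]
            have hle : (rest.eraseIdx j.toNat).length ≤ rest.length := by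
              rw [List.length_eraseIdx]; split <;> omega
            rw [ih (rest.eraseIdx j.toNat).length (by omega) (rest.eraseIdx j.toNat) (k - 1) rfl]
          · -- lower ≥ 1 block equals A rest k, then the induction hypothesis
            have hb : ((x :: rest).length : Int) - 1 - (k - 1) * 2
                = ((rest.length : Int) - 1 - (k - 1) * 2) + 1 := by
              rw [hL]; ring
            rw [hb, pv_flatMap_pyRange_shift 0 ((rest.length : Int) - 1 - (k - 1) * 2)]
            have hrest : ∀ lower ∈ PySem.List.pyRange 0 ((rest.length : Int) - 1 - (k - 1) * 2) 1,
                (PySem.List.pyRange (lower + 1 + 1) (((x :: rest).length : Int)) 1).flatMap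
                  (fun higher =>
                    (contraction_specific_indices (((x :: rest).eraseIdx higher.toNat).drop (lower + 1 + 1).toNat) (k - 1)).map
                      (fun c => [PySem.List.pyGetD (x :: rest) (lower + 1) 0, PySem.List.pyGetD (x :: rest) higher 0] :: c))
                = (PySem.List.pyRange (lower + 1) (rest.length : Int) 1).flatMap
                  (fun higher =>
                    (contraction_specific_indices ((rest.eraseIdx higher.toNat).drop (lower + 1).toNat) (k - 1)).map
                      (fun c => [PySem.List.pyGetD rest lower 0, PySem.List.pyGetD rest higher 0] :: c)) := by
              intro lower hlow
              obtain ⟨hl0, hllt⟩ := PySem.List.mem_pyRange_one.mp hlow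
              rw [hL, pv_flatMap_pyRange_shift (lower + 1) (rest.length : Int)]
              apply pv_flatMap_congr_mem
              intro higher hhig
              dsimp only
              obtain ⟨hh1, hh2⟩ := PySem.List.mem_pyRange_one.mp hhig
              have hth : (higher + 1).toNat = higher.toNat + 1 := by omega
              have htl : ((lower + 1) + 1).toNat = (lower + 1).toNat + 1 := by omega
              have hred : ((x :: rest).eraseIdx (higher + 1).toNat).drop ((lower + 1) + 1).toNat
                  = (rest.eraseIdx higher.toNat).drop (lower + 1).toNat := by
                rw [hth, htl]; simp [List.eraseIdx_cons_succ]
              rw [hred]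
              rw [pv_getD_cons_succ x rest lower hl0, pv_getD_cons_succ x rest higher (by omega)]
            calc (PySem.List.pyRange 0 ((rest.length : Int) - 1 - (k - 1) * 2) 1).flatMap _
                = contraction_specific_indices rest k := by
                  rw [pv_A_unfold rest k hk]; exact pv_flatMap_congr_mem hrest
              _ = contraction_specific_indices_alt rest k := ih rest.length hrl rest k rfl

-- ===== VERDICT (by name: the statement is the Claim_ definition above) =====
theorem contraction_specific_indices_spec : Claim_equal_contraction_specific_indices := by
  intro lst k _
  unfold Spec_contraction_specific_indices
  exact pv_main lst.length lst k rfl
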